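-- pv_equiv track=rewrite | github.com/kmonguu/Algorithm | Python/Programmers/codingTest/Level 0/문자열 밀기.py | solution
-- ===== SOURCE A (Python) =====
-- def solution(A, B):
--     cnt = 0
--
--     for _ in range(len(A)):
--         if A != B:
--             A = list(A)
--             A = [A[-1]]+A[0:-1]
--             cnt +=1
--             A = ''.join(A)
--
--         else:
--             return cnt
--
--     return -1
-- ===== SOURCE B (Python) =====
-- def solution(A, B):
--     # k right-rotations of A equal B  iff  A occurs in B+B at index k (k < len);
--     # the leftmost occurrence gives the minimal rotation count.
--     if len(A) != len(B):
--         return -1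
--     return (B + B).find(A)
-- ===== Notes on version B (the rewrite author's own statement) =====
-- stated objective: faster
-- what changed: Replaces the rotate-and-compare loop (rebuilding and comparing the string each step) with a single substring search of A in B+B, whose leftmost index is the rotation count.
-- intended difference: On A = '' and B = '' A's loop body never runs and it returns -1, while B returns 0, the intended answer since the empty string equals itself after 0 rotations. — e.g. on solution("", ""): A returns -1, B returns 0
import Mathlib
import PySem

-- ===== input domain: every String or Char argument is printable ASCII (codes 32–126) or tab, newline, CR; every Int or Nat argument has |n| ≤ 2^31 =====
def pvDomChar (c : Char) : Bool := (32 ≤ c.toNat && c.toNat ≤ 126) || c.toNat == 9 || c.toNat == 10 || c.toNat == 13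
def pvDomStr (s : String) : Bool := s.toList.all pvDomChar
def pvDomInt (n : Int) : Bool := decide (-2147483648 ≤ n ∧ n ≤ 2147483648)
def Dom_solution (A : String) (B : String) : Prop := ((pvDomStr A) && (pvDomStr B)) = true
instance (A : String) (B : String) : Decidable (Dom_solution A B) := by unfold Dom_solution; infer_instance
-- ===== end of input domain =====

-- B replaces A's rotate-and-compare loop by one substring search of A in B+B (leftmost index = rotation count).

-- ===== PORT A =====
-- one loop body rebuild: A = [A[-1]] + A[0:-1]  (A[-1] can only raise on A = '', which the loop never reaches:
-- range(len(A)) is empty then; Option.toList makes the port total there)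
def pvRot (l : List Char) : List Char :=
  (PySem.List.pyGet? l (-1)).toList ++ PySem.List.slice l (some 0) (some (-1))

-- the 'for _ in range(len(A))' loop with its mutation of A and cnt and the early return
def pvLoop (B : String) : Nat → String → Int → Int
  | 0, _, _ => -1
  | n + 1, A, cnt =>
    if A ≠ B then
      -- A = ''.join(A) over the single-char pieces
      pvLoop B n (String.ofList (PySem.Chars.join [] ((pvRot A.toList).map (fun c => [c])))) (cnt + 1)
    else cnt

def solution (A : String) (B : String) : Int :=
  pvLoop B (PySem.Str.len A).toNat A 0

-- ===== PORT B =====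
def solution_alt (A : String) (B : String) : Int :=
  if PySem.Str.len A ≠ PySem.Str.len B then -1
  else PySem.Str.find (B ++ B) A

-- ===== PRECONDITION & SPEC =====
-- On A = '' and B = '' A's loop body never runs and it returns -1, while B returns 0, the intended
-- answer since the empty string equals itself after 0 rotations.
def D_solution (A : String) (B : String) : Prop := A = "" ∧ B = ""
instance (A : String) (B : String) : Decidable (D_solution A B) := by unfold D_solution; infer_instance
def Spec_solution (A : String) (B : String) (out : Int) : Prop := ¬ D_solution A B → out = solution_alt A B
instance (A : String) (B : String) (out : Int) : Decidable (Spec_solution A B out) := by unfold Spec_solution; infer_instance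
def pvDiffWitness_solution : String × String := ("", "")
def pvDiffWitnessOut_solution : Int × Int := (-1, 0)

-- ===== CLAIM (what is proved, stated in full; the proofs are below) =====
def Claim_unchanged_solution : Prop := ∀ (A : String) (B : String), Dom_solution A B → Spec_solution A B (solution A B)
def Claim_changed_solution : Prop := Dom_solution (pvDiffWitness_solution.1) (pvDiffWitness_solution.2) ∧ D_solution (pvDiffWitness_solution.1) (pvDiffWitness_solution.2) ∧ solution (pvDiffWitness_solution.1) (pvDiffWitness_solution.2) = pvDiffWitnessOut_solution.1 ∧ solution_alt (pvDiffWitness_solution.1) (pvDiffWitness_solution.2) = pvDiffWitnessOut_solution.2 ∧ pvDiffWitnessOut_solution.1 ≠ pvDiffWitnessOut_solution.2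
def Claim_exact_solution : Prop := ∀ (A : String) (B : String), Dom_solution A B → D_solution A B → solution A B ≠ solution_alt A B

-- ===== LEMMAS AND PROOFS =====

def pvRotIter (k : Nat) (l : List Char) : List Char := pvRot^[k] l

lemma pvRot_nil : pvRot ([] : List Char) = [] := by
  simp [pvRot, PySem.List.pyGet?_neg_one, PySem.List.slice_to_neg_one]

lemma pvRot_eq (l : List Char) (h : l ≠ []) : pvRot l = l.getLast h :: l.dropLast := by
  simp [pvRot, PySem.List.pyGet?_neg_one, PySem.List.slice_to_neg_one,
    List.getLast?_eq_some_getLast h]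

lemma pvRot_length (l : List Char) : (pvRot l).length = l.length := by
  rcases eq_or_ne l [] with rfl | h
  · simp [pvRot_nil]
  · rw [pvRot_eq l h]
    have hl : 0 < l.length := List.length_pos_of_ne_nil h
    simp [List.length_dropLast]
    omega

lemma pvRotIter_length (k : Nat) (l : List Char) : (pvRotIter k l).length = l.length := by
  induction k generalizing l with
  | zero => simp [pvRotIter]
  | succ k ih =>
    simp only [pvRotIter, Function.iterate_succ_apply] at *
    rw [ih (pvRot l), pvRot_length]

lemma pvRot_inv (X A : List Char) (hA : A ≠ []) (hX : X ≠ []) :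
    X = pvRot A ↔ X.rotate 1 = A := by
  constructor
  · rintro rfl
    rw [pvRot_eq A hA, List.rotate_cons_succ, List.rotate_zero,
      List.dropLast_append_getLast hA]
  · intro h
    rcases X with _ | ⟨c, t⟩
    · exact absurd rfl hX
    · rw [List.rotate_cons_succ, List.rotate_zero] at h
      subst h
      rw [pvRot_eq _ hA]
      simp

lemma pvRotIter_eq_iff (k : Nat) (A B : List Char) (h : A.length = B.length)
    (hne : A ≠ []) : pvRotIter k A = B ↔ B.rotate k = A := by
  induction k generalizing A with
  | zero => simp [pvRotIter, eq_comm]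
  | succ k ih =>
    have hlen : (pvRot A).length = B.length := by rw [pvRot_length]; exact h
    have hA0 : 0 < A.length := List.length_pos_of_ne_nil hne
    have hne' : pvRot A ≠ [] := by
      intro hnil
      have h1 := pvRot_length A
      rw [hnil] at h1
      simp at h1
      omega
    have hrk : B.rotate k ≠ [] := by
      intro hnil
      have h1 := List.length_rotate B k
      rw [hnil] at h1
      simp at h1
      omega
    rw [pvRotIter, Function.iterate_succ_apply]
    rw [show pvRot^[k] (pvRot A) = pvRotIter k (pvRot A) from rfl, ih _ hlen hne']
    rw [pvRot_inv _ _ hne hrk, List.rotate_rotate]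

-- occurrence of A at position k in B++B  ↔  k right-rotations of A give B
lemma pvKey (A B : List Char) (n k : Nat) (hA : A.length = n) (hB : B.length = n)
    (hn : 0 < n) (hk : k ≤ n) :
    (pvRotIter k A = B ↔ A <+: (B ++ B).drop k) := by
  have hne : A ≠ [] := by
    intro h; rw [h] at hA; simp at hA; omega
  have hkB : k ≤ B.length := by omega
  rw [pvRotIter_eq_iff k A B (by omega) hne]
  rw [List.drop_append_of_le_length hkB]
  rw [List.prefix_iff_eq_take]
  have htake : (B.drop k ++ B).take A.length = B.drop k ++ B.take k := by
    rw [List.take_append]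
    congr 1
    · rw [List.take_of_length_le]
      simp
      omega
    · congr 1
      simp
      omega
  rw [htake, List.rotate_eq_drop_append_take hkB, eq_comm]

lemma pvFind?_range_eq_some {p : Nat → Bool} {n k : Nat}
    (h : (List.range n).find? p = some k) :
    p k = true ∧ k < n ∧ ∀ j < k, p j = false := by
  induction n generalizing p k with
  | zero => simp at h
  | succ n ih =>
    rw [List.range_succ_eq_map] at h
    by_cases hp : p 0 = true
    · rw [List.find?_cons_of_pos hp] at h
      cases h
      exact ⟨hp, Nat.succ_pos n, fun j hj => absurd hj (Nat.not_lt_zero j)⟩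
    · rw [List.find?_cons_of_neg hp, List.find?_map] at h
      rcases Option.map_eq_some_iff.mp h with ⟨k', hk', rfl⟩
      obtain ⟨h1, h2, h3⟩ := ih hk'
      refine ⟨h1, by omega, ?_⟩
      intro j hj
      cases j with
      | zero => exact Bool.eq_false_iff.mpr hp
      | succ j' => exact h3 j' (by omega)

lemma pvLoop_eq (B : String) (n : Nat) (A : String) (cnt : Int) :
    pvLoop B n A cnt =
      match (List.range n).find? (fun k => pvRotIter k A.toList == B.toList) with
      | some k => cnt + (k : Int)
      | none => -1 := by
  induction n generalizing A cnt with
  | zero => simp [pvLoop]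
  | succ n ih =>
    by_cases hAB : A = B
    · have h0 : (fun k => pvRotIter k A.toList == B.toList) 0 = true := by
        simp [pvRotIter, hAB]
      rw [List.range_succ_eq_map,
        List.find?_cons_of_pos (p := fun k => pvRotIter k A.toList == B.toList) h0]
      simp [pvLoop, hAB]
    · have h0 : ¬ (fun k => pvRotIter k A.toList == B.toList) 0 = true := by
        simp [pvRotIter]
        exact fun hh => hAB (String.toList_inj.mp hh)
      rw [List.range_succ_eq_map,
        List.find?_cons_of_neg (p := fun k => pvRotIter k A.toList == B.toList) h0,
        List.find?_map]
      have hloop : pvLoop B (n + 1) A cnt =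
          pvLoop B n (String.ofList (PySem.Chars.join []
            ((pvRot A.toList).map (fun c => [c])))) (cnt + 1) := by
        simp [pvLoop, hAB]
      rw [hloop, ih]
      have hstr : (String.ofList (PySem.Chars.join []
          ((pvRot A.toList).map (fun c => [c])))).toList = pvRot A.toList := by
        rw [PySem.Chars.join_nil_singletons, String.toList_ofList]
      rw [hstr]
      have hcomp : (fun k => pvRotIter k (pvRot A.toList) == B.toList) =
          ((fun k => pvRotIter k A.toList == B.toList) ∘ Nat.succ) := by
        funext k
        simp [Function.comp, pvRotIter, Function.iterate_succ_apply]
      rw [hcomp]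
      cases hf : (List.range n).find? ((fun k => pvRotIter k A.toList == B.toList) ∘ Nat.succ) with
      | none => simp
      | some k =>
        simp only [Option.map_some]
        push_cast
        ring

-- ===== VERDICT (by name: the statement is the Claim_ definition above) =====
theorem solution_spec : Claim_unchanged_solution := by
  intro A B _ hD'
  unfold solution solution_alt
  have hlenA : (PySem.Str.len A).toNat = A.toList.length := by
    rw [PySem.Str.len_eq]; exact Int.toNat_natCast _
  rw [hlenA, pvLoop_eq, PySem.Str.len_eq, PySem.Str.len_eq, PySem.Str.find_eq]
  simp only [String.toList_append]
  by_cases hlen : A.toList.length = B.toList.length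
  · -- equal lengths
    rw [if_neg (by exact_mod_cast not_not.mpr (congrArg (Nat.cast : ℕ → ℤ) hlen))]
    have hpos : 0 < A.toList.length := by
      rcases Nat.eq_zero_or_pos A.toList.length with h0 | h
      · exfalso
        apply hD'
        constructor
        · exact String.toList_eq_nil_iff.mp (List.eq_nil_of_length_eq_zero h0)
        · exact String.toList_eq_nil_iff.mp (List.eq_nil_of_length_eq_zero (by omega))
      · exact h
    cases hfind : (List.range A.toList.length).find? (fun k => pvRotIter k A.toList == B.toList) with
    | none =>
      have hnone : ∀ k < A.toList.length, pvRotIter k A.toList ≠ B.toList := by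
        intro k hk hkeq
        have := List.find?_eq_none.mp hfind k (List.mem_range.mpr hk)
        simp [hkeq] at this
      have hninf : ¬ A.toList <:+: (B.toList ++ B.toList) := by
        intro hinf
        have hisin : PySem.Chars.isIn A.toList (B.toList ++ B.toList) = true :=
          (PySem.Chars.isIn_iff_infix _ _).mpr hinf
        obtain ⟨j, hj⟩ := (PySem.Chars.exists_prefix_drop_iff_isIn _ _).mpr hisin
        have hjlen : A.toList.length ≤ ((B.toList ++ B.toList).drop j).length := hj.length_le
        simp only [List.length_drop, List.length_append] at hjlen
        rcases Nat.lt_or_ge j A.toList.length with hjlt | hjge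
        · exact hnone j hjlt
            ((pvKey A.toList B.toList A.toList.length j rfl hlen.symm hpos (by omega)).mpr hj)
        · have hjeq : j = A.toList.length := by omega
          subst hjeq
          have hdropn : (B.toList ++ B.toList).drop A.toList.length = B.toList := by
            rw [show A.toList.length = B.toList.length from hlen, List.drop_left]
          rw [hdropn] at hj
          have : A.toList = B.toList := hj.eq_of_length (by omega)
          exact hnone 0 hpos (by simpa [pvRotIter] using this)
      rw [(PySem.Chars.find_eq_neg_one_iff _ _).mpr hninf]
    | some k =>
      obtain ⟨hpk, hkn, hmin⟩ := pvFind?_range_eq_some hfind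
      have hk : pvRotIter k A.toList = B.toList := by simpa using hpk
      have hpref : A.toList <+: (B.toList ++ B.toList).drop k :=
        (pvKey A.toList B.toList A.toList.length k rfl hlen.symm hpos (by omega)).mp hk
      have hinf : A.toList <:+: (B.toList ++ B.toList) := by
        rw [← PySem.Chars.isIn_iff_infix]
        exact (PySem.Chars.exists_prefix_drop_iff_isIn _ _).mp ⟨k, hpref⟩
      have hFpos : 0 ≤ PySem.Chars.find (B.toList ++ B.toList) A.toList :=
        (PySem.Chars.find_nonneg_iff _ _).mpr hinf
      obtain ⟨hFpref, hFmin⟩ := PySem.Chars.find_spec hFpos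
      have hFk : (PySem.Chars.find (B.toList ++ B.toList) A.toList).toNat ≤ k := by
        by_contra hgt
        exact hFmin k (by omega) hpref
      have hkF : ¬ (PySem.Chars.find (B.toList ++ B.toList) A.toList).toNat < k := by
        intro hlt
        have : pvRotIter (PySem.Chars.find (B.toList ++ B.toList) A.toList).toNat A.toList = B.toList :=
          (pvKey A.toList B.toList A.toList.length _ rfl hlen.symm hpos (by omega)).mpr hFpref
        have := hmin _ hlt
        simp_all
      have hFeq : PySem.Chars.find (B.toList ++ B.toList) A.toList = (k : Int) := by
        rw [← Int.toNat_of_nonneg hFpos]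
        exact_mod_cast congrArg (Nat.cast : ℕ → ℤ) (by omega)
      rw [hFeq]
      simp
  · -- different lengths: no rotation of A equals B, and B's length test returns -1
    rw [if_pos (by exact_mod_cast fun h => hlen (by exact_mod_cast h))]
    have hnone : (List.range A.toList.length).find? (fun k => pvRotIter k A.toList == B.toList) = none := by
      rw [List.find?_eq_none]
      intro k _ hp
      simp at hp
      have := pvRotIter_length k A.toList
      rw [hp] at this
      exact hlen this.symm
    rw [hnone]

theorem solution_changed : Claim_changed_solution := by
  unfold Claim_changed_solution
  decide

theorem solution_tight : Claim_exact_solution := by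
  intro A B _ hD
  obtain ⟨rfl, rfl⟩ := hD
  decide
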